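-- pv_equiv track=rewrite | github.com/joaopaulonsoares/Compilador_LispF_ck_Trab04 | lispf_ck_interpreter_trab04.py | do_before
-- ===== SOURCE A (Python) =====
-- def do_before(command, old_array):
--     array = []
--     count = 0
--     while count < len(old_array):
--         array.append(command)
--         array.append(old_array[count])
--         if old_array[count] == 'add' or old_array[count] == 'sub':
--             count += 1
--             array.append(old_array[count])
--
--         count += 1
--
--     return array
-- ===== SOURCE B (Python) =====
-- def do_before(command, old_array):
--     # pass 1: tokenize into groups; 'add'/'sub' consume their operand
--     groups = []
--     i = 0
--     n = len(old_array)
--     while i < n: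
--         tok = old_array[i]
--         if tok == 'add' or tok == 'sub':
--             groups.append([tok, old_array[i + 1]])
--             i += 2
--         else:
--             groups.append([tok])
--             i += 1
--     # pass 2: emit command before each group
--     out = []
--     for g in groups:
--         out.append(command)
--         out.extend(g)
--     return out
-- ===== Notes on version B (the rewrite author's own statement) =====
-- stated objective: alternative
-- what changed: Replaces A's single interleaving while-loop with a two-pass tokenize-then-emit shape: first build an explicit list of token groups (add/sub consume their operand), then prepend the command to each group.
import Mathlib
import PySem

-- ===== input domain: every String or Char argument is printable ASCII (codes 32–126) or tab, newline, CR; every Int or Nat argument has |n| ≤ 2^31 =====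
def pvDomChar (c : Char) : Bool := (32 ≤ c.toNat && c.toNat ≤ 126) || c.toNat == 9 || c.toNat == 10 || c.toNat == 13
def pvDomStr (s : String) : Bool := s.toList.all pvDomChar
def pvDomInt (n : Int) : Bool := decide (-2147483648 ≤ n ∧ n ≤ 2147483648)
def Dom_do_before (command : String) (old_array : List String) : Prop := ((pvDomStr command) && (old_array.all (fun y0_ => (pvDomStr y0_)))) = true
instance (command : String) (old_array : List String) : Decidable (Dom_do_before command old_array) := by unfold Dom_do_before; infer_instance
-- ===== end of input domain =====

-- B re-decomposes A's single interleaving loop into tokenize-then-emit with an explicit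
-- intermediate group list (objective: alternative decomposition; same cost).

-- ===== PORT A =====
-- A's while loop over count: each iteration appends command and the current token, and for
-- 'add'/'sub' also the next element (Python raises IndexError if there is none — outside Pre_,
-- where this port stops after [command, x]).
def do_before_go (command : String) : List String → List String
  | [] => []
  | x :: rest =>
    if x = "add" ∨ x = "sub" then
      match rest with
      | [] => [command, x]                               -- Python: IndexError (excluded by Pre_)
      | y :: rest' => command :: x :: y :: do_before_go command rest'
    else command :: x :: do_before_go command rest

def do_before (command : String) (old_array : List String) : List String :=
  do_before_go command old_array

-- ===== PORT B =====
-- pass 1 of Source B: tokenize into groups; 'add'/'sub' consume their operand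
def do_before_tokenize : List String → List (List String)
  | [] => []
  | x :: rest =>
    if x = "add" ∨ x = "sub" then
      match rest with
      | [] => [[x]]                                      -- Python: IndexError (excluded by Pre_)
      | y :: rest' => [x, y] :: do_before_tokenize rest'
    else [x] :: do_before_tokenize rest

def do_before_alt (command : String) (old_array : List String) : List String :=
  -- pass 2 of Source B: for g in groups: out.append(command); out.extend(g)
  (do_before_tokenize old_array).foldl (fun out g => out ++ (command :: g)) []

-- ===== PRECONDITION & SPEC =====
-- Pre_ excludes exactly the inputs on which Python A raises IndexError, i.e. where an
-- 'add'/'sub' lands in operator position as the last element; in closed form, that happens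
-- exactly when the trailing run of 'add'/'sub' tokens has odd length. (B raises there too.)
def Pre_do_before (command : String) (old_array : List String) : Prop :=
  (old_array.reverse.takeWhile (fun t => t = "add" || t = "sub")).length % 2 = 0
instance (command : String) (old_array : List String) : Decidable (Pre_do_before command old_array) := by unfold Pre_do_before; infer_instance

def pvWitness_do_before : String × List String := ("cmd", ["add", "2", "x", "sub", "3"])

def Spec_do_before (command : String) (old_array : List String) (out : List String) : Prop := out = do_before_alt command old_array
instance (command : String) (old_array : List String) (out : List String) : Decidable (Spec_do_before command old_array out) := by unfold Spec_do_before; infer_instance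

-- ===== CLAIM (what is proved, stated in full; the proofs are below) =====
def Claim_equal_do_before : Prop := ∀ (command : String) (old_array : List String), Dom_do_before command old_array → Pre_do_before command old_array → Spec_do_before command old_array (do_before command old_array)

-- ===== LEMMAS AND PROOFS =====
theorem foldl_emit (c : String) (gs : List (List String)) (acc : List String) :
    gs.foldl (fun out g => out ++ (c :: g)) acc = acc ++ gs.flatMap (fun g => c :: g) := by
  induction gs generalizing acc with
  | nil => simp
  | cons g gs ih => simp [List.foldl, ih]

theorem tokenize_emit (c : String) (l : List String) :
    (do_before_tokenize l).flatMap (fun g => c :: g) = do_before_go c l := by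
  induction l using do_before_tokenize.induct with
  | case1 => simp [do_before_tokenize, do_before_go]
  | case2 x h => simp [do_before_tokenize, do_before_go, h]
  | case3 x h y rest' ih =>
      simp [do_before_tokenize, do_before_go, h, ih]
  | case4 x rest h ih =>
      rw [do_before_tokenize.eq_def, do_before_go.eq_def]
      simp [h, ih]

-- ===== VERDICT (by name: the statement is the Claim_ definition above) =====
theorem do_before_spec : Claim_equal_do_before := by
  intro command old_array _ _
  unfold Spec_do_before do_before do_before_alt
  rw [foldl_emit, tokenize_emit, List.nil_append]
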